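-- pv_equiv track=rewrite | github.com/FanboyxD/U-excercises | Recursion de Pila.py | aux_numpares
-- ===== SOURCE A (Python) =====
-- def aux_numpares(Num):
--   dig=Num%10
--   if Num==0:
--     return 0
--   elif dig%2==0:
--     return dig+10*aux_numpares(Num//10)
--   else:
--     return aux_numpares(Num//10)
-- ===== SOURCE B (Python) =====
-- def aux_numpares(Num):
--   result = 0
--   mult = 1
--   while Num != 0:
--     dig = Num % 10
--     if dig % 2 == 0:
--       result += dig * mult
--       mult *= 10
--     Num //= 10
--   return result
-- ===== Notes on version B (the rewrite author's own statement) =====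
-- stated objective: simpler
-- what changed: Replaces the recursion with an iterative while-loop that accumulates the result with a running place multiplier advanced only on even digits.
import Mathlib
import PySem

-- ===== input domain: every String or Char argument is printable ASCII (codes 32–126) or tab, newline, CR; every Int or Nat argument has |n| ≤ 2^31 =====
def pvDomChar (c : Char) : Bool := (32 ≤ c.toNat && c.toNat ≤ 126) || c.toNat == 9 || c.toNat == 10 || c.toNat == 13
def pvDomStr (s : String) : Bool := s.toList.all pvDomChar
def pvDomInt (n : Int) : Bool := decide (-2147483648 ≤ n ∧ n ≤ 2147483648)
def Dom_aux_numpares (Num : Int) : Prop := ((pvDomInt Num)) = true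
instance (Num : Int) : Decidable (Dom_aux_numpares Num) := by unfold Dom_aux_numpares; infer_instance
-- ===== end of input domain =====

-- B replaces A's recursion with an iterative accumulator loop (result + place multiplier advanced on even digits): simpler, constant stack.


-- ===== PORT A =====
-- Literal transliteration of the recursion; the 'Num < 0' guard only totalises
-- (the Python recursion never terminates for negative Num, which Pre_ excludes).
def aux_numpares (Num : Int) : Int :=
  let dig := PySem.Int.mod Num 10
  if Num = 0 then 0
  else if Num < 0 then 0
  else if PySem.Int.mod dig 2 = 0 then dig + 10 * aux_numpares (PySem.Int.floordiv Num 10)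
  else aux_numpares (PySem.Int.floordiv Num 10)
termination_by Num.toNat
decreasing_by
  all_goals
    rw [PySem.Int.floordiv_eq_ediv_of_pos (by omega)]
    omega

-- ===== PORT B =====
-- the while-loop of Source B as tail recursion over the loop state (Num, result, mult);
-- the 'Num < 0' guard only totalises (the Python loop never exits for negative Num, excluded by Pre_).
def auxLoop (Num result mult : Int) : Int :=
  if Num = 0 then result
  else if Num < 0 then result
  else
    let dig := PySem.Int.mod Num 10
    if PySem.Int.mod dig 2 = 0 then
      auxLoop (PySem.Int.floordiv Num 10) (result + dig * mult) (mult * 10)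
    else
      auxLoop (PySem.Int.floordiv Num 10) result mult
termination_by Num.toNat
decreasing_by
  all_goals
    rw [PySem.Int.floordiv_eq_ediv_of_pos (by omega)]
    omega

def aux_numpares_alt (Num : Int) : Int := auxLoop Num 0 1

-- ===== PRECONDITION & SPEC =====
-- Pre_ excludes negative Num: there the Python A raises RecursionError (Num//10 never reaches 0) and B's loop does not terminate.
def Pre_aux_numpares (Num : Int) : Prop := 0 ≤ Num
instance (Num : Int) : Decidable (Pre_aux_numpares Num) := by unfold Pre_aux_numpares; infer_instance
def pvWitness_aux_numpares : Int := (2468)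

def Spec_aux_numpares (Num : Int) (out : Int) : Prop := out = aux_numpares_alt Num
instance (Num : Int) (out : Int) : Decidable (Spec_aux_numpares Num out) := by unfold Spec_aux_numpares; infer_instance

-- ===== CLAIM (what is proved, stated in full; the proofs are below) =====
def Claim_equal_aux_numpares : Prop := ∀ (Num : Int), Dom_aux_numpares Num → Pre_aux_numpares Num → Spec_aux_numpares Num (aux_numpares Num)

-- ===== LEMMAS AND PROOFS =====

-- loop invariant: the accumulator loop computes result + mult * (A's value)
theorem auxLoop_inv (Num result mult : Int) (h : 0 ≤ Num) :
    auxLoop Num result mult = result + mult * aux_numpares Num := by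
  by_cases h0 : Num = 0
  · subst h0; simp [auxLoop, aux_numpares]
  · have hpos : 0 < Num := by omega
    have hq : 0 ≤ PySem.Int.floordiv Num 10 := by
      rw [PySem.Int.floordiv_eq_ediv_of_pos (by omega)]; omega
    have ih := auxLoop_inv (PySem.Int.floordiv Num 10) -- recursive use
    have hneg : ¬ Num < 0 := by omega
    rw [auxLoop, aux_numpares]
    simp only [h0, hneg, if_false]
    by_cases he : PySem.Int.mod (PySem.Int.mod Num 10) 2 = 0
    · simp only [he, if_true]
      rw [ih (result + PySem.Int.mod Num 10 * mult) (mult * 10) hq]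
      ring
    · simp only [he, if_false]
      rw [ih result mult hq]
termination_by Num.toNat
decreasing_by
  rw [PySem.Int.floordiv_eq_ediv_of_pos (by omega)]
  omega

-- ===== VERDICT (by name: the statement is the Claim_ definition above) =====
theorem aux_numpares_spec : Claim_equal_aux_numpares := by
  intro Num _ hpre
  unfold Spec_aux_numpares aux_numpares_alt
  rw [auxLoop_inv Num 0 1 hpre]
  ring
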